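-- pv_equiv track=rewrite | github.com/evgenyz/pyprospector | pyprospector/filters.py | _cel_permissions_match
-- ===== SOURCE A (Python) =====
-- def _cel_permissions_match(permissions: str, mask: str) -> bool:
--     # -rwsr-xr-x, ???s??????
--     if len(permissions) != len(mask):
--         return False
--     for i, s in enumerate(permissions):
--         if mask[i] != '?':
--             if s != mask[i]:
--                 return False
--     return True
-- ===== SOURCE B (Python) =====
-- import re
--
-- def _cel_permissions_match(permissions: str, mask: str) -> bool:
--     # Compile the mask into a regex ('?' -> '.', everything else escaped)
--     # and delegate matching to the regex engine; fullmatch enforces equal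
--     # length, DOTALL lets '?' match newlines too.
--     pattern = ''.join('.' if c == '?' else re.escape(c) for c in mask)
--     return re.fullmatch(pattern, permissions, re.DOTALL) is not None
-- ===== Notes on version B (the rewrite author's own statement) =====
-- stated objective: idiomatic
-- what changed: B compiles the mask into a regular expression ('?' -> '.', other characters re.escape'd) and delegates the whole comparison to re.fullmatch with DOTALL, instead of A's explicit index-by-index loop with early returns.
import Mathlib
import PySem

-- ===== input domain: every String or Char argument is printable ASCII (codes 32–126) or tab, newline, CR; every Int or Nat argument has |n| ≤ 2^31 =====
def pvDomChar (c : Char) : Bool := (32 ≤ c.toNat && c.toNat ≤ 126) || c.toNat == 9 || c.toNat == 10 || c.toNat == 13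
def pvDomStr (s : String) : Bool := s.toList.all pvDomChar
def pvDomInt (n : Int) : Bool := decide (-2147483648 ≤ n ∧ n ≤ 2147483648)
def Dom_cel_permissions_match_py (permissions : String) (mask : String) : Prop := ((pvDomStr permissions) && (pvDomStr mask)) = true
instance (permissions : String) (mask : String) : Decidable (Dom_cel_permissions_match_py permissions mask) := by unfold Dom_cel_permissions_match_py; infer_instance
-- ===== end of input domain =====

-- B builds a regex pattern from the mask and delegates to fullmatch instead of A's indexed early-return loop (idiomatic, same cost).

-- ===== PORT A =====
-- the 'for i, s in enumerate(permissions)' loop with early 'return False';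
-- mask[i] is ported with pyGet? (the none branch is unreachable: the loop only runs after len equality)
def celA_loop (mask : List Char) : List Char → Nat → Bool
  | [], _ => true
  | s :: rest, i =>
    match PySem.List.pyGet? mask (i : Int) with
    | none => true
    | some m => if m ≠ '?' then (if s ≠ m then false else celA_loop mask rest (i + 1))
                else celA_loop mask rest (i + 1)

def cel_permissions_match_py (permissions : String) (mask : String) : Bool :=
  if permissions.toList.length ≠ mask.toList.length then false
  else celA_loop mask.toList permissions.toList 0

-- ===== PORT B =====
-- Python's re has no Lean counterpart, so the two re.* calls Source B makes are
-- ported by hand, exactly for the pattern class Source B produces (literals,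
-- backslash escapes and '.'):
-- re.escape of one character: Python 3 escapes exactly the characters in
-- _special_chars_map = b'()[]{}?*+-|^$\.&~# \t\n\r\v\f' (backslash + char)
def celB_specials : List Char :=
  ['(', ')', '[', ']', '{', '}', '?', '*', '+', '-', '|', '^', '$', '\\', '.',
   '&', '~', '#', ' ', '\t', '\n', '\r', Char.ofNat 11, Char.ofNat 12]

def celB_escape (c : Char) : List Char :=
  if c ∈ celB_specials then ['\\', c] else [c]

-- pattern = ''.join('.' if c == '?' else re.escape(c) for c in mask)
def celB_pattern (mask : List Char) : List Char :=
  mask.flatMap (fun c => if c = '?' then ['.'] else celB_escape c)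

-- the regex engine's compilation of such a pattern: a token per position,
-- none = '.' (any char, DOTALL), some c = the literal c ('\' escapes the next char)
def celB_tokenize : List Char → List (Option Char)
  | [] => []
  | [c] => if c = '.' then [none] else [some c]
  | c :: d :: rest =>
    if c = '\\' then some d :: celB_tokenize rest
    else if c = '.' then none :: celB_tokenize (d :: rest)
    else some c :: celB_tokenize (d :: rest)

-- re.fullmatch on a token-list pattern: anchored at both ends
def celB_fullmatch : List (Option Char) → List Char → Bool
  | [], [] => true
  | none :: ts, _ :: cs => celB_fullmatch ts cs
  | some t :: ts, c :: cs => (c == t) && celB_fullmatch ts cs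
  | _, _ => false

def cel_permissions_match_py_alt (permissions : String) (mask : String) : Bool :=
  celB_fullmatch (celB_tokenize (celB_pattern mask.toList)) permissions.toList

-- ===== PRECONDITION & SPEC =====
def Spec_cel_permissions_match_py (permissions : String) (mask : String) (out : Bool) : Prop := out = cel_permissions_match_py_alt permissions mask
instance (permissions : String) (mask : String) (out : Bool) : Decidable (Spec_cel_permissions_match_py permissions mask out) := by unfold Spec_cel_permissions_match_py; infer_instance

-- ===== CLAIM (what is proved, stated in full; the proofs are below) =====
def Claim_equal_cel_permissions_match_py : Prop := ∀ (permissions : String) (mask : String), Dom_cel_permissions_match_py permissions mask → Spec_cel_permissions_match_py permissions mask (cel_permissions_match_py permissions mask)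

-- ===== LEMMAS AND PROOFS =====

-- the token a mask character compiles to
def celB_tok (c : Char) : Option Char := if c = '?' then none else some c

-- tokenizing the encoding of one mask character peels off exactly its token
theorem celB_tokenize_enc (c : Char) (rest : List Char) :
    celB_tokenize ((if c = '?' then ['.'] else celB_escape c) ++ rest)
      = celB_tok c :: celB_tokenize rest := by
  by_cases hq : c = '?'
  · subst hq
    cases rest <;> simp [celB_tokenize, celB_tok]
  · by_cases hs : c ∈ celB_specials
    · simp [celB_escape, hs, celB_tokenize, celB_tok, hq]
    · have hb : c ≠ '\\' := by intro h; subst h; simp [celB_specials] at hs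
      have hd : c ≠ '.' := by intro h; subst h; simp [celB_specials] at hs
      cases rest <;> simp [celB_escape, hs, celB_tokenize, celB_tok, hq, hb, hd]

-- compiling the whole pattern gives one token per mask character
theorem celB_tokenize_pattern (ms : List Char) :
    celB_tokenize (celB_pattern ms) = ms.map celB_tok := by
  induction ms with
  | nil => simp [celB_pattern, celB_tokenize]
  | cons c rest ih =>
    simp only [celB_pattern, List.flatMap_cons] at *
    rw [celB_tokenize_enc, ih, List.map_cons]

-- anchored matching of the compiled mask = length equality + pointwise wildcard test
theorem celB_fullmatch_map (ms ps : List Char) :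
    celB_fullmatch (ms.map celB_tok) ps
      = (decide (ps.length = ms.length) &&
         (ps.zip ms).all (fun sm => sm.2 == '?' || sm.1 == sm.2)) := by
  induction ms generalizing ps with
  | nil => cases ps <;> simp [celB_fullmatch]
  | cons m mrest ih =>
    cases ps with
    | nil =>
      cases hm : celB_tok m <;> simp [celB_fullmatch, hm]
    | cons p prest =>
      by_cases hq : m = '?'
      · simp [celB_tok, hq, celB_fullmatch, ih]
      · by_cases hp : p = m
        · simp [celB_tok, hq, hp, celB_fullmatch, ih]
        · simp [celB_tok, hq, celB_fullmatch, ih,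
            beq_eq_false_iff_ne.mpr hp, beq_eq_false_iff_ne.mpr hq]
  
-- loop invariant: with the index aligned to the not-yet-consumed part of the mask,
-- A's loop computes exactly the pointwise wildcard test
theorem celA_loop_eq (ps ms : List Char) (i : Nat) (h : i + ps.length = ms.length) :
    celA_loop ms ps i
      = (ps.zip (ms.drop i)).all (fun sm => sm.2 == '?' || sm.1 == sm.2) := by
  induction ps generalizing i with
  | nil => simp [celA_loop]
  | cons s rest ih =>
    have hi : i < ms.length := by simp at h; omega
    have hdrop : ms.drop i = ms[i] :: ms.drop (i + 1) := List.drop_eq_getElem_cons hi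
    have hget : PySem.List.pyGet? ms (i : Int) = some ms[i] := by
      simp [PySem.List.pyGet?_natCast, List.getElem?_eq_getElem hi]
    rw [hdrop]
    simp only [celA_loop, hget, List.zip_cons_cons, List.all_cons]
    have := ih (i + 1) (by simp at h ⊢; omega)
    by_cases hq : ms[i] = '?'
    · simp [hq, this]
    · by_cases hs : s = ms[i] <;> simp [hq, hs, this]

-- ===== VERDICT (by name: the statement is the Claim_ definition above) =====
theorem cel_permissions_match_py_spec : Claim_equal_cel_permissions_match_py := by
  intro permissions mask _
  unfold Spec_cel_permissions_match_py cel_permissions_match_py cel_permissions_match_py_alt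
  rw [celB_tokenize_pattern, celB_fullmatch_map]
  by_cases hlen : permissions.toList.length = mask.toList.length
  · simp [hlen, celA_loop_eq _ _ 0 (by simpa using hlen)]
  · have h' : permissions.length ≠ mask.length := by
      rwa [← String.length_toList, ← String.length_toList]
    simp [h']
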